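-- pv_equiv track=rewrite | github.com/rusvoskres/python_homework1 | lesson4.py | Rare_Letter
-- ===== SOURCE A (Python) =====
-- def Rare_Letter(list):
--     stat={}
--     for i in range(0,len(list)):
--         if list[i][0:1] in stat.keys():
--             stat[list[i][0:1]]+=1
--         else:
--             stat[list[i][0:1]]=1
--     sorted_list=sorted(stat,key=stat.get, reverse=False)
--     return sorted_list[0]
-- ===== SOURCE B (Python) =====
-- def Rare_Letter(list):
--     best = None
--     best_cnt = 0
--     seen = []
--     for s in list:
--         c = s[0:1]
--         if c not in seen:
--             seen.append(c)
--             cnt = sum(1 for t in list if t[0:1] == c)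
--             if best is None or cnt < best_cnt:
--                 best, best_cnt = c, cnt
--     return best
-- ===== Notes on version B (the rewrite author's own statement) =====
-- stated objective: alternative
-- what changed: B never builds a frequency table and never sorts: it makes one selection scan over the strings, and for each first-letter seen for the first time counts its occurrences on the fly and keeps a running strict minimum (letter, count), which preserves A's first-appearance tie-breaking without the sort.
import Mathlib
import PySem

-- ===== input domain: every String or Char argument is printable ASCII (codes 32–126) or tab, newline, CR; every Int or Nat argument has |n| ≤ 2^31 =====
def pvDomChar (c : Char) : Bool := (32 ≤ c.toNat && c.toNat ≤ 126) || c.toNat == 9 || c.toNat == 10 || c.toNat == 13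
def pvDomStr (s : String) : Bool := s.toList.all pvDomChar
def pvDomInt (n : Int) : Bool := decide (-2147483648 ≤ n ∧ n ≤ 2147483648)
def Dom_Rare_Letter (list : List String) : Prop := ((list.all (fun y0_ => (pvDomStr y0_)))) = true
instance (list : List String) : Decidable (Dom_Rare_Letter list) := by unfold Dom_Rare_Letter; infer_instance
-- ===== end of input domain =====

-- B replaces A's frequency-dict build + sort-by-count by a single selection scan with a running
-- strict minimum (letter, count), counting each new first-letter on the fly (objective: alternative).

-- ===== PORT A =====
def Rare_Letter (list : List String) : String :=
  let stat : PySem.Dict String Int :=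
    (PySem.List.pyRange 0 (list.length : Int) 1).foldl
      (fun stat i =>
        if stat.contains (PySem.Str.slice (PySem.List.pyGetD list i "") (some 0) (some 1)) then
          stat.insert (PySem.Str.slice (PySem.List.pyGetD list i "") (some 0) (some 1))
            (stat.getD (PySem.Str.slice (PySem.List.pyGetD list i "") (some 0) (some 1)) 0 + 1)
        else
          stat.insert (PySem.Str.slice (PySem.List.pyGetD list i "") (some 0) (some 1)) 1)
      PySem.Dict.empty
  let sorted_list := PySem.List.sorted stat.keys (fun k => stat.getD k 0) false
  PySem.List.pyGetD sorted_list 0 ""   -- sorted_list[0]; Pre_ excludes the empty list, where Python raises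

-- ===== PORT B =====
-- state = (best, best_cnt, seen); on the empty list Python's 'return best' yields None (no String),
-- which Pre_ excludes; the port returns "" there via getD.
def Rare_Letter_alt (list : List String) : String :=
  let st := list.foldl
    (fun (st : Option String × Int × List String) s =>
      let c := PySem.Str.slice s (some 0) (some 1)
      if c ∈ st.2.2 then st
      else
        let cnt : Int :=
          list.foldl (fun a t => if PySem.Str.slice t (some 0) (some 1) = c then a + 1 else a) 0
        if st.1 = none ∨ cnt < st.2.1 then (some c, cnt, st.2.2 ++ [c])
        else (st.1, st.2.1, st.2.2 ++ [c]))
    (none, 0, [])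
  st.1.getD ""

-- ===== PRECONDITION & SPEC =====
-- Pre_ excludes only the empty list, on which A's sorted_list[0] raises IndexError (B returns no String either).
def Pre_Rare_Letter (list : List String) : Prop := list ≠ []
instance (list : List String) : Decidable (Pre_Rare_Letter list) := by unfold Pre_Rare_Letter; infer_instance
def pvWitness_Rare_Letter : List String := ["ab", "cd", "ab"]

def Spec_Rare_Letter (list : List String) (out : String) : Prop := out = Rare_Letter_alt list
instance (list : List String) (out : String) : Decidable (Spec_Rare_Letter list out) := by unfold Spec_Rare_Letter; infer_instance

-- ===== CLAIM (what is proved, stated in full; the proofs are below) =====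
def Claim_equal_Rare_Letter : Prop := ∀ (list : List String), Dom_Rare_Letter list → Pre_Rare_Letter list → Spec_Rare_Letter list (Rare_Letter list)

-- ===== LEMMAS AND PROOFS =====

-- A's dict-building loop builds Counter(firsts)
theorem pv_stat_eq_counter (list : List String) :
    (PySem.List.pyRange 0 (list.length : Int) 1).foldl
      (fun stat i =>
        if stat.contains (PySem.Str.slice (PySem.List.pyGetD list i "") (some 0) (some 1)) then
          stat.insert (PySem.Str.slice (PySem.List.pyGetD list i "") (some 0) (some 1))
            (stat.getD (PySem.Str.slice (PySem.List.pyGetD list i "") (some 0) (some 1)) 0 + 1)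
        else
          stat.insert (PySem.Str.slice (PySem.List.pyGetD list i "") (some 0) (some 1)) 1)
      PySem.Dict.empty
    = PySem.Dict.counter (list.map (fun s => PySem.Str.slice s (some 0) (some 1))) := by
  rw [PySem.List.foldl_pyRange_zero_pyGetD' list ""
    (fun (stat : PySem.Dict String Int) (s : String) =>
        if stat.contains (PySem.Str.slice s (some 0) (some 1)) then
          stat.insert (PySem.Str.slice s (some 0) (some 1))
            (stat.getD (PySem.Str.slice s (some 0) (some 1)) 0 + 1)
        else
          stat.insert (PySem.Str.slice s (some 0) (some 1)) 1)
    PySem.Dict.empty]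
  rw [← PySem.Dict.foldl_insert_getD_add_one_eq_counter, List.foldl_map]
  congr 1
  funext d s
  by_cases h : d.contains (PySem.Str.slice s (some 0) (some 1)) = true
  · simp [h]
  · simp only [Bool.not_eq_true] at h
    simp [h, PySem.Dict.getD_of_not_contains _ _ h]

-- the first-minimum fold (B's 'best' update), over an already-deduplicated list
def pvOptMin (key : String → Int) (ds : List String) : Option String :=
  ds.foldl (fun b c => match b with
    | none => some c
    | some b' => if key c < key b' then some c else some b') none

-- head of PySem's stable insertion sort = first minimum
theorem pv_head_insertBy (key : String → Int) (x : String) (acc : List String) :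
    (PySem.List.insertBy (fun a b => decide (key a < key b)) x acc).head? =
      match acc.head? with
      | none => some x
      | some a => if key x < key a then some x else some a := by
  cases acc with
  | nil => rfl
  | cons a t =>
      show (if decide (key x < key a) = true then x :: a :: t
            else a :: PySem.List.insertBy _ x t).head? = _
      by_cases h : key x < key a <;> simp [h]

theorem pv_foldl_insertBy_head (key : String → Int) (ds : List String) :
    ∀ (acc : List String),
      (ds.foldl (fun acc x => PySem.List.insertBy (fun a b => decide (key a < key b)) x acc) acc).head?
        = ds.foldl (fun b c => match b with
            | none => some c
            | some b' => if key c < key b' then some c else some b') acc.head? := by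
  induction ds with
  | nil => intro acc; rfl
  | cons c ds ih =>
      intro acc
      simp only [List.foldl_cons]
      rw [ih, pv_head_insertBy]

theorem pv_sorted_head (key : String → Int) (ds : List String) :
    (PySem.List.sorted ds key false).head? = pvOptMin key ds := by
  rw [PySem.List.sorted_eq_foldl_insertBy]
  exact pv_foldl_insertBy_head key ds []

-- ordered dedup relative to already-seen elements
def pvDedupFrom (l : List String) (s : List String) : List String :=
  match l with
  | [] => []
  | c :: l => if c ∈ s then pvDedupFrom l s else c :: pvDedupFrom l (s ++ [c])

theorem pv_foldl_add_eq_dedupFrom (l : List String) :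
    ∀ s : List String, l.foldl PySem.Set.add s = s ++ pvDedupFrom l s := by
  induction l with
  | nil => intro s; simp [pvDedupFrom]
  | cons c l ih =>
      intro s
      by_cases h : c ∈ s
      · simp [pvDedupFrom, h, PySem.Set.add, List.contains_eq_mem, ih]
      · simp [pvDedupFrom, h, PySem.Set.add, List.contains_eq_mem, ih (s ++ [c])]

theorem pv_ofList_eq_dedupFrom (l : List String) :
    PySem.Set.ofList l = pvDedupFrom l [] := by
  show l.foldl PySem.Set.add ([] : List String) = _
  rw [pv_foldl_add_eq_dedupFrom l []]; rfl

-- B's scan computes pvOptMin over the deduplicated first-letter list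
theorem pv_scan_eq_optMin (key : String → Int) (l : List String) :
    ∀ (b : Option String) (bc : Int) (s : List String),
      (b = none ∨ ∃ x, b = some x ∧ bc = key x) →
      (l.foldl
        (fun (st : Option String × Int × List String) c =>
          if c ∈ st.2.2 then st
          else if st.1 = none ∨ key c < st.2.1 then (some c, key c, st.2.2 ++ [c])
          else (st.1, st.2.1, st.2.2 ++ [c]))
        (b, bc, s)).1
      = (pvDedupFrom l s).foldl (fun b c => match b with
          | none => some c
          | some b' => if key c < key b' then some c else some b') b := by
  induction l with
  | nil => intro b bc s _; rfl
  | cons c l ih =>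
      intro b bc s hinv
      by_cases hs : c ∈ s
      · simpa [pvDedupFrom, hs] using ih b bc s hinv
      · rcases hinv with hb | ⟨x, hb, hbc⟩
        · subst hb
          simpa [pvDedupFrom, hs] using ih (some c) (key c) (s ++ [c]) (Or.inr ⟨c, rfl, rfl⟩)
        · subst hb; subst hbc
          by_cases hlt : key c < key x
          · simpa [pvDedupFrom, hs, hlt] using ih (some c) (key c) (s ++ [c]) (Or.inr ⟨c, rfl, rfl⟩)
          · simpa [pvDedupFrom, hs, hlt] using ih (some x) (key x) (s ++ [c]) (Or.inr ⟨x, rfl, rfl⟩)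

-- the inner counting loop is the count of c among the first letters
theorem pv_cnt_eq_count (list : List String) (c : String) :
    list.foldl (fun a t => if PySem.Str.slice t (some 0) (some 1) = c then a + 1 else a) 0
      = (((list.map (fun s => PySem.Str.slice s (some 0) (some 1))).count c : Nat) : Int) := by
  rw [PySem.List.foldl_ite_add_one (fun t => PySem.Str.slice t (some 0) (some 1) = c) list 0]
  have hcp : List.countP (fun x => decide (PySem.Str.slice x (some 0) (some 1) = c)) list
      = List.countP (fun x => PySem.Str.slice x (some 0) (some 1) == c) list := by
    apply List.countP_congr
    intro x _
    by_cases h : PySem.Str.slice x (some 0) (some 1) = c <;> simp [h]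
  simp [List.count, List.countP_map, Function.comp_def, hcp]

-- ===== VERDICT (by name: the statement is the Claim_ definition above) =====
theorem Rare_Letter_spec : Claim_equal_Rare_Letter := by
  intro list _ hpre
  unfold Spec_Rare_Letter Rare_Letter Rare_Letter_alt
  set firsts := list.map (fun s => PySem.Str.slice s (some 0) (some 1)) with hf
  set key : String → Int := fun c => ((firsts.count c : Nat) : Int) with hkey
  have hB : (list.foldl
      (fun (st : Option String × Int × List String) s =>
        let c := PySem.Str.slice s (some 0) (some 1)
        if c ∈ st.2.2 then st
        else
          let cnt : Int :=
            list.foldl (fun a t => if PySem.Str.slice t (some 0) (some 1) = c then a + 1 else a) 0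
          if st.1 = none ∨ cnt < st.2.1 then (some c, cnt, st.2.2 ++ [c])
          else (st.1, st.2.1, st.2.2 ++ [c]))
      (none, 0, [])).1 = pvOptMin key (PySem.Set.ofList firsts) := by
    have h1 : (list.foldl
        (fun (st : Option String × Int × List String) s =>
          let c := PySem.Str.slice s (some 0) (some 1)
          if c ∈ st.2.2 then st
          else
            let cnt : Int :=
              list.foldl (fun a t => if PySem.Str.slice t (some 0) (some 1) = c then a + 1 else a) 0
            if st.1 = none ∨ cnt < st.2.1 then (some c, cnt, st.2.2 ++ [c])
            else (st.1, st.2.1, st.2.2 ++ [c]))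
        (none, 0, []))
      = (firsts.foldl
          (fun (st : Option String × Int × List String) c =>
            if c ∈ st.2.2 then st
            else if st.1 = none ∨ key c < st.2.1 then (some c, key c, st.2.2 ++ [c])
            else (st.1, st.2.1, st.2.2 ++ [c]))
          (none, 0, [])) := by
      rw [hf, List.foldl_map]
      congr 1
      funext st s
      simp only [pv_cnt_eq_count, ← hf]
      rfl
    rw [h1, pv_scan_eq_optMin key firsts none 0 [] (Or.inl rfl), pv_ofList_eq_dedupFrom]
    rfl
  simp only [pv_stat_eq_counter, ← hf]
  simp only [PySem.Dict.keys_counter, PySem.Dict.getD_counter, hB]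
  rw [show (fun k => ((firsts.count k : Nat) : Int)) = key from rfl,
    ← pv_sorted_head key (PySem.Set.ofList firsts)]
  have hne : PySem.List.sorted (PySem.Set.ofList firsts) key false ≠ [] := by
    rw [Ne, PySem.List.sorted_eq_nil_iff]
    intro h
    have : firsts ≠ [] := by
      simp [hf]; exact hpre
    rcases List.exists_mem_of_ne_nil firsts this with ⟨x, hx⟩
    have := (PySem.Set.mem_ofList firsts x).mpr hx
    rw [h] at this
    exact absurd this (List.not_mem_nil)
  cases hs : PySem.List.sorted (PySem.Set.ofList firsts) key false with
  | nil => exact absurd hs hne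
  | cons m t => simp [PySem.List.pyGetD, PySem.List.pyGet?, PySem.List.pyIdx?]
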